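-- pv_equiv track=rewrite | github.com/Kawser-nerd/CLCDSA | Source Codes/CodeJamData/13/04/7.py | check
-- ===== SOURCE A (Python) =====
-- from itertools import chain
--
-- def check(keys, chests):
--     all_keys = keys
--     need_keys = ()
--
--     for index, curr_key, keys_inside in chests:
--         all_keys = all_keys + keys_inside
--         need_keys = need_keys + (curr_key,)
--
--     for key in set(need_keys):
--         if all_keys.count(key) < need_keys.count(key):
--             return False
--
--     tchests = chests
--     tkeys = set(keys)
--     while tchests:
--         can_open = tuple(map(lambda c: c[2], filter(lambda c: c[1] in tkeys, tchests)))
--         if not can_open: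
--             return False
--         tchests = tuple(filter(lambda c: c[1] not in tkeys, tchests))
--         tkeys |= set(chain.from_iterable(filter(bool, can_open)))
--
--     return True
-- ===== SOURCE B (Python) =====
-- def check(keys, chests):
--     # one pass: multiset of available keys, multiset of required keys
--     have = {}
--     for k in keys:
--         have[k] = have.get(k, 0) + 1
--     need = {}
--     for _, curr_key, keys_inside in chests:
--         need[curr_key] = need.get(curr_key, 0) + 1
--         for k in keys_inside:
--             have[k] = have.get(k, 0) + 1
--     for k, n in need.items():
--         if have.get(k, 0) < n:
--             return False
--     # reachability of key TYPES: iterate the one-step closure to a fixpoint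
--     reached = set(keys)
--     for _ in range(len(chests)):
--         new = set(reached)
--         for _, curr_key, keys_inside in chests:
--             if curr_key in reached:
--                 new.update(keys_inside)
--         if new == reached:
--             break
--         reached = new
--     return all(curr_key in reached for _, curr_key, _ki in chests)
-- ===== Notes on version B (the rewrite author's own statement) =====
-- stated objective: faster
-- what changed: B replaces A's quadratic tuple-concatenation + per-key .count availability check by one dict-counting pass, and A's while-loop that rebuilds filtered chest tuples each round by a fixpoint iteration of the one-step key-type closure with an early break, checking chest openability by membership at the end.
import Mathlib
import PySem

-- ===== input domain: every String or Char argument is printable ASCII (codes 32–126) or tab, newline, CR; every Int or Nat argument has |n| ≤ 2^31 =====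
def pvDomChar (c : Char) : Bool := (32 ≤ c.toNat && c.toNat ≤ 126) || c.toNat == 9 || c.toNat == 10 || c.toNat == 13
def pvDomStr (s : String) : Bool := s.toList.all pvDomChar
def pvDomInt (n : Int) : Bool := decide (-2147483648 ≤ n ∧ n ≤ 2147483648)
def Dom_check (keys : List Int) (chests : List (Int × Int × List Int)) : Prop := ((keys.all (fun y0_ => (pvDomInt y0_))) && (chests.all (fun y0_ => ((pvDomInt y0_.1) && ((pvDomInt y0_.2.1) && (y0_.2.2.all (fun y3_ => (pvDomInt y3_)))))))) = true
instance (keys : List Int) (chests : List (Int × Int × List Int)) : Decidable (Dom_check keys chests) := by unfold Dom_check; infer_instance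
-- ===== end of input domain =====

-- B: one dict-counting pass for the availability check and a fixpoint iteration of the
-- one-step key-type closure (with early break) instead of A's quadratic tuple
-- concatenation / .count scans and chest-tuple-filtering while loop.


-- ===== PORT A =====
-- the 'while tchests:' loop of A; terminates because the filter drops at least one chest
def checkWhile (tchests : List (Int × Int × List Int)) (tkeys : PySem.Set Int) : Bool :=
  if tchests = [] then
    true
  else
    let can_open := (tchests.filter (fun c => PySem.Set.contains tkeys c.2.1)).map (fun c => c.2.2)
    if hc : can_open = [] then
      false
    else
      checkWhile (tchests.filter (fun c => !(PySem.Set.contains tkeys c.2.1)))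
        (PySem.Set.union tkeys ((can_open.filter (fun l => !(l == ([] : List Int)))).flatten))
termination_by tchests.length
decreasing_by
  rw [List.length_unattach, show tchests.length = tchests.attach.length from (List.length_attach (l := tchests)).symm]
  refine List.length_filter_lt_length_iff_exists.mpr ?_
  rcases List.exists_mem_of_ne_nil _ hc with ⟨l, hl⟩
  rcases List.mem_map.mp hl with ⟨c, hcmem, _⟩
  exact ⟨c, (List.mem_filter.mp hcmem).1, by simpa using (List.mem_filter.mp hcmem).2⟩

def check (keys : List Int) (chests : List (Int × Int × List Int)) : Bool :=
  let all_keys := chests.foldl (fun acc c => acc ++ c.2.2) keys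
  let need_keys := chests.foldl (fun acc c => acc ++ [c.2.1]) []
  -- 'for key in set(need_keys): if …: return False' (order-independent: an existence test)
  if (PySem.Set.ofList need_keys).any (fun k => all_keys.count k < need_keys.count k) then
    false
  else
    checkWhile chests (PySem.Set.ofList keys)

-- ===== PORT B =====
-- one round of B's inner loop: new = set(reached); for chests: if curr_key in reached: new.update(keys_inside)
def altRound (chests : List (Int × Int × List Int)) (reached : PySem.Set Int) : PySem.Set Int :=
  chests.foldl (fun new c => if PySem.Set.contains reached c.2.1 then PySem.Set.update new c.2.2 else new) reached

-- B's 'for _ in range(len(chests)): … if new == reached: break; reached = new'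
def altLoop (chests : List (Int × Int × List Int)) : Nat → PySem.Set Int → PySem.Set Int
  | 0, reached => reached
  | t + 1, reached =>
    let new := altRound chests reached
    if PySem.Set.equal new reached then reached else altLoop chests t new

def check_alt (keys : List Int) (chests : List (Int × Int × List Int)) : Bool :=
  let have0 := keys.foldl (fun d k => d.insert k (d.getD k 0 + 1)) (PySem.Dict.empty : PySem.Dict Int Int)
  let nh := chests.foldl
    (fun (p : PySem.Dict Int Int × PySem.Dict Int Int) c =>
      (p.1.insert c.2.1 (p.1.getD c.2.1 0 + 1),
       c.2.2.foldl (fun d k => d.insert k (d.getD k 0 + 1)) p.2))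
    ((PySem.Dict.empty : PySem.Dict Int Int), have0)
  if nh.1.items.any (fun p => nh.2.getD p.1 0 < p.2) then
    false
  else
    let reached := altLoop chests chests.length (PySem.Set.ofList keys)
    chests.all (fun c => PySem.Set.contains reached c.2.1)

-- ===== PRECONDITION & SPEC =====
def Spec_check (keys : List Int) (chests : List (Int × Int × List Int)) (out : Bool) : Prop := out = check_alt keys chests
instance (keys : List Int) (chests : List (Int × Int × List Int)) (out : Bool) : Decidable (Spec_check keys chests out) := by unfold Spec_check; infer_instance

-- ===== CLAIM (what is proved, stated in full; the proofs are below) =====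
def Claim_equal_check : Prop := ∀ (keys : List Int) (chests : List (Int × Int × List Int)), Dom_check keys chests → Spec_check keys chests (check keys chests)

-- ===== LEMMAS AND PROOFS =====

-- membership in one closure round (the fold of altRound, with the tested set r fixed)
theorem mem_roundFold (l : List (Int × Int × List Int)) (r acc : PySem.Set Int) (x : Int) :
    x ∈ l.foldl (fun new c => if PySem.Set.contains r c.2.1 then PySem.Set.update new c.2.2 else new) acc ↔
      x ∈ acc ∨ ∃ c ∈ l, c.2.1 ∈ r ∧ x ∈ c.2.2 := by
  induction l generalizing acc with
  | nil => simp
  | cons c l ih =>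
    simp only [List.foldl_cons]
    by_cases hc : PySem.Set.contains r c.2.1 = true
    · rw [if_pos hc, ih, PySem.Set.mem_update]
      have hc' : c.2.1 ∈ r := (PySem.Set.contains_iff _ _).mp hc
      simp only [List.mem_cons]
      constructor
      · rintro ((hx | hk) | ⟨c', hc'', hk, hx⟩)
        · exact Or.inl hx
        · exact Or.inr ⟨c, Or.inl rfl, hc', hk⟩
        · exact Or.inr ⟨c', Or.inr hc'', hk, hx⟩
      · rintro (hx | ⟨c', (rfl | hc''), hk, hx⟩)
        · exact Or.inl (Or.inl hx)
        · exact Or.inl (Or.inr hx)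
        · exact Or.inr ⟨c', hc'', hk, hx⟩
    · rw [if_neg hc, ih]
      have hc' : c.2.1 ∉ r := fun hm => hc ((PySem.Set.contains_iff _ _).mpr hm)
      simp only [List.mem_cons]
      constructor
      · rintro (hx | ⟨c', hc'', hx⟩)
        · exact Or.inl hx
        · exact Or.inr ⟨c', Or.inr hc'', hx⟩
      · rintro (hx | ⟨c', (rfl | hc''), hk, hx⟩)
        · exact Or.inl hx
        · exact absurd hk hc'
        · exact Or.inr ⟨c', hc'', hk, hx⟩

theorem mem_altRound (chests : List (Int × Int × List Int)) (r : PySem.Set Int) (x : Int) :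
    x ∈ altRound chests r ↔ x ∈ r ∨ ∃ c ∈ chests, c.2.1 ∈ r ∧ x ∈ c.2.2 :=
  mem_roundFold chests r r x

theorem mem_altRound_congr (chests : List (Int × Int × List Int)) (r r' : PySem.Set Int)
    (h : ∀ y, y ∈ r ↔ y ∈ r') (x : Int) :
    x ∈ altRound chests r ↔ x ∈ altRound chests r' := by
  simp only [mem_altRound, h]

theorem mem_iter_congr (chests : List (Int × Int × List Int)) (t : Nat) :
    ∀ (r r' : PySem.Set Int), (∀ y, y ∈ r ↔ y ∈ r') →
    ∀ x, x ∈ (altRound chests)^[t] r ↔ x ∈ (altRound chests)^[t] r' := by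
  induction t with
  | zero => intro r r' h x; simpa using h x
  | succ t ih =>
    intro r r' h x
    rw [Function.iterate_succ_apply, Function.iterate_succ_apply]
    exact ih _ _ (mem_altRound_congr chests r r' h) x

theorem mem_iter_of_mem (chests : List (Int × Int × List Int)) (t : Nat)
    (r : PySem.Set Int) (x : Int) (hx : x ∈ r) : x ∈ (altRound chests)^[t] r := by
  induction t with
  | zero => simpa using hx
  | succ t ih =>
    rw [Function.iterate_succ_apply']
    exact (mem_altRound chests _ x).mpr (Or.inl ih)

theorem mem_iter_fix (chests : List (Int × Int × List Int))
    (r : PySem.Set Int) (hfix : ∀ y, y ∈ altRound chests r ↔ y ∈ r) (t : Nat) (x : Int) :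
    x ∈ (altRound chests)^[t] r ↔ x ∈ r := by
  induction t with
  | zero => simp
  | succ t ih =>
    rw [Function.iterate_succ_apply]
    exact (mem_iter_congr chests t _ _ hfix x).trans ih

theorem mem_iter_mono (chests : List (Int × Int × List Int)) (t n : Nat) (ht : t ≤ n)
    (r : PySem.Set Int) (x : Int) (hx : x ∈ (altRound chests)^[t] r) :
    x ∈ (altRound chests)^[n] r := by
  have : n = (n - t) + t := by omega
  rw [this, Function.iterate_add_apply]
  exact mem_iter_of_mem chests _ _ x hx

theorem mem_altLoop (chests : List (Int × Int × List Int)) (t : Nat) :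
    ∀ (r : PySem.Set Int) (x : Int), x ∈ altLoop chests t r ↔ x ∈ (altRound chests)^[t] r := by
  induction t with
  | zero => intro r x; simp [altLoop]
  | succ t ih =>
    intro r x
    simp only [altLoop]
    by_cases h : PySem.Set.equal (altRound chests r) r = true
    · have hfix := (PySem.Set.equal_iff _ _).mp h
      rw [if_pos h]
      exact ((mem_iter_fix chests r hfix (t+1) x).symm)
    · rw [if_neg h, ih, Function.iterate_succ_apply]

-- evaluation equations for checkWhile, in plain (attach-free) form
theorem checkWhile_nil (T : PySem.Set Int) : checkWhile [] T = true := by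
  rw [checkWhile.eq_def]; rfl

theorem checkWhile_stuck (tchests : List (Int × Int × List Int)) (T : PySem.Set Int)
    (h : tchests ≠ []) (hco : tchests.filter (fun c => PySem.Set.contains T c.2.1) = []) :
    checkWhile tchests T = false := by
  rw [checkWhile.eq_def, if_neg h]
  rw [dif_pos (show (tchests.filter (fun c => PySem.Set.contains T c.2.1)).map (fun c => c.2.2) = []
    by rw [hco]; rfl)]

theorem checkWhile_step (tchests : List (Int × Int × List Int)) (T : PySem.Set Int)
    (h : tchests ≠ []) (hco : tchests.filter (fun c => PySem.Set.contains T c.2.1) ≠ []) :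
    checkWhile tchests T =
      checkWhile (tchests.filter (fun c => !(PySem.Set.contains T c.2.1)))
        (PySem.Set.union T
          ((((tchests.filter (fun c => PySem.Set.contains T c.2.1)).map (fun c => c.2.2)).filter
              (fun l => !(l == ([] : List Int)))).flatten)) := by
  conv_lhs => rw [checkWhile.eq_def]
  rw [if_neg h]
  rw [dif_neg (show ¬ (tchests.filter (fun c => PySem.Set.contains T c.2.1)).map (fun c => c.2.2) = []
    from fun hh => hco (List.map_eq_nil_iff.mp hh))]

-- A's while loop agrees with the n-fold closure iteration
theorem checkWhile_char (chests : List (Int × Int × List Int)) (keys : List Int) :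
    ∀ (tchests : List (Int × Int × List Int)) (T : PySem.Set Int) (t : Nat),
    (∀ c ∈ chests, c ∈ tchests ∨ (c.2.1 ∈ T ∧ ∀ x ∈ c.2.2, x ∈ T)) →
    (∀ c ∈ tchests, c ∈ chests) →
    (∀ y, y ∈ T ↔ y ∈ (altRound chests)^[t] (PySem.Set.ofList keys)) →
    t + tchests.length ≤ chests.length →
    (checkWhile tchests T = true ↔
      ∀ c ∈ chests, c.2.1 ∈ (altRound chests)^[chests.length] (PySem.Set.ofList keys)) := by
  have main : ∀ (N : Nat) (tchests : List (Int × Int × List Int)) (T : PySem.Set Int) (t : Nat),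
      tchests.length ≤ N →
      (∀ c ∈ chests, c ∈ tchests ∨ (c.2.1 ∈ T ∧ ∀ x ∈ c.2.2, x ∈ T)) →
      (∀ c ∈ tchests, c ∈ chests) →
      (∀ y, y ∈ T ↔ y ∈ (altRound chests)^[t] (PySem.Set.ofList keys)) →
      t + tchests.length ≤ chests.length →
      (checkWhile tchests T = true ↔
        ∀ c ∈ chests, c.2.1 ∈ (altRound chests)^[chests.length] (PySem.Set.ofList keys)) := by
    intro N
    induction N with
    | zero =>
      intro tchests T t hN inv1 inv2 hT hlen
      have hnil : tchests = [] := List.eq_nil_of_length_eq_zero (Nat.le_zero.mp hN)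
      subst hnil
      rw [checkWhile_nil]
      simp only [List.length_nil] at hlen
      refine ⟨fun _ c hc => ?_, fun _ => rfl⟩
      rcases inv1 c hc with hmem | ⟨hck, _⟩
      · cases hmem
      · exact mem_iter_mono chests t _ (by omega) _ _ ((hT _).mp hck)
    | succ N ih =>
      intro tchests T t hN inv1 inv2 hT hlen
      by_cases hnil : tchests = []
      · subst hnil
        rw [checkWhile_nil]
        simp only [List.length_nil] at hlen
        refine ⟨fun _ c hc => ?_, fun _ => rfl⟩
        rcases inv1 c hc with hmem | ⟨hck, _⟩
        · cases hmem
        · exact mem_iter_mono chests t _ (by omega) _ _ ((hT _).mp hck)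
      by_cases hco : tchests.filter (fun c => PySem.Set.contains T c.2.1) = []
      · -- stuck: nothing openable, A answers false, and the closure is already a fixpoint
        rw [checkWhile_stuck tchests T hnil hco]
        have hforall : ∀ c ∈ tchests, c.2.1 ∉ T := by
          intro c hc hmem
          have h2 := List.filter_eq_nil_iff.mp hco c hc
          exact h2 (by simpa using (PySem.Set.contains_iff _ _).mpr hmem)
        have hfix : ∀ y, y ∈ altRound chests T ↔ y ∈ T := by
          intro y
          rw [mem_altRound]
          constructor
          · rintro (hy | ⟨c, hcc, hck, hyk⟩)
            · exact hy
            · rcases inv1 c hcc with hmem | ⟨_, habs⟩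
              · exact absurd hck (hforall c hmem)
              · exact habs y hyk
          · exact Or.inl
        have hSN : ∀ y, y ∈ (altRound chests)^[chests.length] (PySem.Set.ofList keys) ↔ y ∈ T := by
          intro y
          have hn : chests.length = (chests.length - t) + t := by omega
          rw [hn, Function.iterate_add_apply]
          exact (mem_iter_congr chests _ _ _ (fun z => (hT z).symm) y).trans
            (mem_iter_fix chests T hfix _ y)
        rcases List.exists_mem_of_ne_nil tchests hnil with ⟨c0, hc0⟩
        constructor
        · intro habs; exact absurd habs (by simp)
        · intro hall
          exact absurd ((hSN _).mp (hall c0 (inv2 c0 hc0))) (hforall c0 hc0)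
      · -- one round: open everything openable
        rw [checkWhile_step tchests T hnil hco]
        have hcont_iff : ∀ c : Int × Int × List Int, PySem.Set.contains T c.2.1 = true ↔ c.2.1 ∈ T :=
          fun c => PySem.Set.contains_iff T c.2.1
        refine ih _ _ (t + 1) ?_ ?_ ?_ ?_ ?_
        case _ =>  -- length bound
          have hlt : (tchests.filter (fun c => !(PySem.Set.contains T c.2.1))).length < tchests.length := by
            refine List.length_filter_lt_length_iff_exists.mpr ?_
            rcases List.exists_mem_of_ne_nil _ hco with ⟨c, hcf⟩
            rcases List.mem_filter.mp hcf with ⟨hct, hcont⟩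
            exact ⟨c, hct, by intro hh; rw [hcont] at hh; simp at hh⟩
          omega
        case _ =>  -- invariant 1
          intro c hc
          have hsubT' : ∀ y ∈ T, y ∈ PySem.Set.union T
              ((((tchests.filter (fun c => PySem.Set.contains T c.2.1)).map (fun c => c.2.2)).filter
                (fun l => !(l == ([] : List Int)))).flatten) :=
            fun y hy => (PySem.Set.mem_union _ _ _).mpr (Or.inl hy)
          rcases inv1 c hc with hmem | ⟨hck, habs⟩
          · by_cases hcont : PySem.Set.contains T c.2.1 = true
            · refine Or.inr ⟨hsubT' _ ((hcont_iff c).mp hcont), ?_⟩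
              intro x hx
              refine (PySem.Set.mem_union _ _ _).mpr (Or.inr ?_)
              rw [List.mem_flatten]
              refine ⟨c.2.2, List.mem_filter.mpr ⟨List.mem_map.mpr
                ⟨c, List.mem_filter.mpr ⟨hmem, hcont⟩, rfl⟩, ?_⟩, hx⟩
              simpa using List.ne_nil_of_mem hx
            · exact Or.inl (List.mem_filter.mpr ⟨hmem, Bool.not_iff_not.mpr hcont⟩)
          · exact Or.inr ⟨hsubT' _ hck, fun x hx => hsubT' _ (habs x hx)⟩
        case _ =>  -- invariant 2
          exact fun c hc => inv2 c (List.mem_filter.mp hc).1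
        case _ =>  -- the new key set is the next closure iterate
          intro y
          have hmemT' : y ∈ PySem.Set.union T
              ((((tchests.filter (fun c => PySem.Set.contains T c.2.1)).map (fun c => c.2.2)).filter
                (fun l => !(l == ([] : List Int)))).flatten) ↔
              y ∈ T ∨ ∃ c ∈ tchests, c.2.1 ∈ T ∧ y ∈ c.2.2 := by
            rw [PySem.Set.mem_union, List.mem_flatten]
            apply or_congr Iff.rfl
            constructor
            · rintro ⟨l, hl, hyl⟩
              rcases List.mem_filter.mp hl with ⟨hl2, _⟩
              rcases List.mem_map.mp hl2 with ⟨c, hcf, rfl⟩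
              rcases List.mem_filter.mp hcf with ⟨hct, hcont⟩
              exact ⟨c, hct, (hcont_iff c).mp hcont, hyl⟩
            · rintro ⟨c, hct, hck, hyk⟩
              refine ⟨c.2.2, List.mem_filter.mpr ⟨List.mem_map.mpr
                ⟨c, List.mem_filter.mpr ⟨hct, (hcont_iff c).mpr hck⟩, rfl⟩, ?_⟩, hyk⟩
              simpa using List.ne_nil_of_mem hyk
          rw [hmemT', Function.iterate_succ_apply', mem_altRound]
          constructor
          · rintro (hy | ⟨c, hct, hck, hyk⟩)
            · exact Or.inl ((hT y).mp hy)
            · exact Or.inr ⟨c, inv2 c hct, (hT _).mp hck, hyk⟩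
          · rintro (hy | ⟨c, hcc, hck, hyk⟩)
            · exact Or.inl ((hT y).mpr hy)
            · rcases inv1 c hcc with hmem | ⟨_, habs⟩
              · exact Or.inr ⟨c, hmem, (hT _).mpr hck, hyk⟩
              · exact Or.inl (habs y hyk)
        case _ =>  -- step budget
          have hlt : (tchests.filter (fun c => !(PySem.Set.contains T c.2.1))).length < tchests.length := by
            refine List.length_filter_lt_length_iff_exists.mpr ?_
            rcases List.exists_mem_of_ne_nil _ hco with ⟨c, hcf⟩
            rcases List.mem_filter.mp hcf with ⟨hct, hcont⟩
            exact ⟨c, hct, by intro hh; rw [hcont] at hh; simp at hh⟩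
          omega
  intro tchests T t inv1 inv2 hT hlen
  exact main tchests.length tchests T t le_rfl inv1 inv2 hT hlen

-- the availability dictionary counts exactly A's concatenated key list
theorem getD_havFold (l : List (Int × Int × List Int)) (d : PySem.Dict Int Int) (v : Int) :
    (l.foldl (fun d c => c.2.2.foldl (fun d k => d.insert k (d.getD k 0 + 1)) d) d).getD v 0 =
      d.getD v 0 + ((l.flatMap (fun c => c.2.2)).count v : Int) := by
  induction l generalizing d with
  | nil => simp
  | cons c l ih =>
    simp only [List.foldl_cons, List.flatMap_cons, List.count_append, ih,
      PySem.Dict.getD_foldl_insert_add_one]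
    push_cast
    ring

-- value of the availability dictionary: it counts A's concatenated key list
theorem getD_hav (keys : List Int) (chests : List (Int × Int × List Int)) (v : Int) :
    (chests.foldl (fun d c => c.2.2.foldl (fun d k => d.insert k (d.getD k 0 + 1)) d)
        (keys.foldl (fun d k => d.insert k (d.getD k 0 + 1)) (PySem.Dict.empty : PySem.Dict Int Int))).getD v 0 =
      ((keys ++ chests.flatMap (fun c => c.2.2)).count v : Int) := by
  rw [getD_havFold, PySem.Dict.getD_foldl_insert_add_one, PySem.Dict.getD_empty, List.count_append]
  push_cast
  ring

-- ===== VERDICT (by name: the statement is the Claim_ definition above) =====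
set_option maxHeartbeats 1000000 in
theorem check_spec : Claim_equal_check := by
  intro keys chests _
  unfold Spec_check
  simp only [check, check_alt]
  rw [PySem.List.foldl_prod_mk
    (f := fun (d : PySem.Dict Int Int) (c : Int × Int × List Int) => d.insert c.2.1 (d.getD c.2.1 0 + 1))
    (g := fun (d : PySem.Dict Int Int) (c : Int × Int × List Int) =>
      c.2.2.foldl (fun d k => d.insert k (d.getD k 0 + 1)) d)]
  have hneed : chests.foldl
      (fun (d : PySem.Dict Int Int) (c : Int × Int × List Int) => d.insert c.2.1 (d.getD c.2.1 0 + 1))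
      PySem.Dict.empty = PySem.Dict.counter (chests.map (fun c => c.2.1)) := by
    rw [← PySem.Dict.foldl_insert_getD_add_one_eq_counter, List.foldl_map]
  dsimp only
  rw [hneed, PySem.Dict.items_counter]
  have hallk : chests.foldl (fun acc c => acc ++ c.2.2) keys = keys ++ chests.flatMap (fun c => c.2.2) :=
    PySem.List.foldl_append_eq_flatMap _ _ _
  have hneedk : chests.foldl (fun acc c => acc ++ [c.2.1]) ([] : List Int) = chests.map (fun c => c.2.1) := by
    rw [PySem.List.foldl_append_singleton_eq_map, List.nil_append]
  rw [hallk, hneedk]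
  rw [List.any_map]
  have hcond : (PySem.Set.ofList (chests.map (fun c => c.2.1))).any
      ((fun p => decide ((chests.foldl (fun d c => c.2.2.foldl (fun d k => d.insert k (d.getD k 0 + 1)) d)
          (keys.foldl (fun d k => d.insert k (d.getD k 0 + 1)) PySem.Dict.empty)).getD p.1 0 < p.2)) ∘
        (fun k => (k, (List.count k (chests.map (fun c => c.2.1)) : Int)))) =
      (PySem.Set.ofList (chests.map (fun c => c.2.1))).any
        (fun k => decide (List.count k (keys ++ chests.flatMap (fun c => c.2.2)) <
          List.count k (chests.map (fun c => c.2.1)))) := by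
    refine PySem.List.any_congr_mem (fun k _ => ?_)
    simp only [Function.comp_apply, getD_hav]
    rw [decide_eq_decide]
    exact Nat.cast_lt
  rw [hcond]
  by_cases hfail : (PySem.Set.ofList (chests.map (fun c => c.2.1))).any
      (fun k => decide (List.count k (keys ++ chests.flatMap (fun c => c.2.2)) <
        List.count k (chests.map (fun c => c.2.1)))) = true
  · rw [if_pos hfail, if_pos hfail]
  · rw [if_neg hfail, if_neg hfail]
    have hiff1 := checkWhile_char chests keys chests (PySem.Set.ofList keys) 0
      (fun c hc => Or.inl hc) (fun c hc => hc)
      (fun y => by rw [Function.iterate_zero_apply])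
      (by omega)
    have hiff2 : (chests.all fun c =>
        PySem.Set.contains (altLoop chests chests.length (PySem.Set.ofList keys)) c.2.1) = true ↔
        ∀ c ∈ chests, c.2.1 ∈ (altRound chests)^[chests.length] (PySem.Set.ofList keys) := by
      rw [List.all_eq_true]
      exact forall_congr' fun c => imp_congr_right fun _ =>
        (PySem.Set.contains_iff _ _).trans (mem_altLoop chests _ _ _)
    exact Bool.coe_iff_coe.mp (hiff1.trans hiff2.symm)
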